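-- pv_equiv track=rewrite | github.com/Ssss112358/crypto-digest | src/delivery/discord.py | _split_topics
-- ===== SOURCE A (Python) =====
-- from typing import List
--
-- def _split_topics(section_lines: List[str]) -> List[str]:
--     topics = []
--     current: List[str] = []
--     for line in section_lines:
--         stripped = line.strip()
--         if stripped.startswith("**") and stripped.endswith("**") and current:
--             topics.append("\n".join(current).strip())
--             current = [line]
--         else:
--             current.append(line)
--     if current:
--         topics.append("\n".join(current).strip())
--     filtered = [topic for topic in topics if topic]
--     if not filtered:
--         return ["該当なし"]
--     return filtered
-- ===== SOURCE B (Python) =====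
-- from typing import List
--
-- def _split_topics(section_lines: List[str]) -> List[str]:
--     def _is_marker(line: str) -> bool:
--         s = line.strip()
--         return s.startswith("**") and s.endswith("**")
--     groups = []
--     rest = section_lines
--     while rest:
--         i = 1
--         while i < len(rest) and not _is_marker(rest[i]):
--             i += 1
--         groups.append(rest[:i])
--         rest = rest[i:]
--     filtered = [t for t in ("\n".join(g).strip() for g in groups) if t]
--     return filtered if filtered else ["該当なし"]
-- ===== Notes on version B (the rewrite author's own statement) =====
-- stated objective: alternative
-- what changed: B finds each topic block by scanning forward from the block head to the next bold-marker line (span-style grouping over slices of the remaining lines), instead of A's single fold that flushes an accumulator whenever a marker line arrives.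
import Mathlib
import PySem

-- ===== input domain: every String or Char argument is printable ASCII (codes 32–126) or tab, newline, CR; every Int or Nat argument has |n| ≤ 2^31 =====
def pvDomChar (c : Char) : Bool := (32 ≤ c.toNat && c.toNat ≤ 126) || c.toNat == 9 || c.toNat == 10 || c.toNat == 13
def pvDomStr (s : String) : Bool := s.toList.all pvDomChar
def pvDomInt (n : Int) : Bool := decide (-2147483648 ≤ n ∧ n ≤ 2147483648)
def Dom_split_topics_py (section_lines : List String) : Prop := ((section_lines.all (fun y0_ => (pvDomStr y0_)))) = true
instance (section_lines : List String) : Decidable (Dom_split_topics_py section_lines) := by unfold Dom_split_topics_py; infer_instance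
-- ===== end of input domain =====

-- B groups the lines by scanning forward to the next bold-marker line (span-style grouping)
-- instead of A's single fold that flushes an accumulator at each marker; objective: alternative decomposition, same cost.

-- ===== PORT A =====
-- one iteration of A's for-loop: state = (topics, current)
def pvStepA (st : List String × List String) (line : String) : List String × List String :=
  let stripped := PySem.Str.strip line
  if (PySem.Str.startswith stripped "**" && PySem.Str.endswith stripped "**") && !st.2.isEmpty then
    (st.1 ++ [PySem.Str.strip (PySem.Str.join "\n" st.2)], [line])
  else
    (st.1, st.2 ++ [line])

def split_topics_py (section_lines : List String) : List String :=
  let r := section_lines.foldl pvStepA ([], [])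
  let topics := if r.2.isEmpty then r.1 else r.1 ++ [PySem.Str.strip (PySem.Str.join "\n" r.2)]
  let filtered := topics.filter (fun t => !(t == ""))
  if filtered.isEmpty then ["該当なし"] else filtered

-- ===== PORT B =====
-- B's helper _is_marker
def pvIsMarker (line : String) : Bool :=
  let s := PySem.Str.strip line
  PySem.Str.startswith s "**" && PySem.Str.endswith s "**"

-- B's inner while: split the lines after the block head at the first marker line
def pvTakeRest : List String → List String × List String
  | [] => ([], [])
  | l :: ls =>
    if pvIsMarker l then ([], l :: ls)
    else
      let p := pvTakeRest ls
      (l :: p.1, p.2)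

lemma pvTakeRest_snd_length : ∀ ls : List String, (pvTakeRest ls).2.length ≤ ls.length := by
  intro ls
  induction ls with
  | nil => simp [pvTakeRest]
  | cons l ls ih =>
    simp only [pvTakeRest]
    split
    · simp
    · exact Nat.le_succ_of_le ih

-- B's outer while: each block is the head line plus the lines up to the next marker
def pvBlocksB : List String → List (List String)
  | [] => []
  | h :: t => (h :: (pvTakeRest t).1) :: pvBlocksB (pvTakeRest t).2
termination_by l => l.length
decreasing_by
  simp only [List.length_cons]
  exact Nat.lt_succ_of_le (pvTakeRest_snd_length t)

def split_topics_py_alt (section_lines : List String) : List String :=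
  let filtered := ((pvBlocksB section_lines).map
      (fun g => PySem.Str.strip (PySem.Str.join "\n" g))).filter (fun t => !(t == ""))
  if filtered.isEmpty then ["該当なし"] else filtered

-- ===== PRECONDITION & SPEC =====
def Spec_split_topics_py (section_lines : List String) (out : List String) : Prop := out = split_topics_py_alt section_lines
instance (section_lines : List String) (out : List String) : Decidable (Spec_split_topics_py section_lines out) := by unfold Spec_split_topics_py; infer_instance

-- ===== CLAIM (what is proved, stated in full; the proofs are below) =====
def Claim_equal_split_topics_py : Prop := ∀ (section_lines : List String), Dom_split_topics_py section_lines → Spec_split_topics_py section_lines (split_topics_py section_lines)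

-- ===== LEMMAS AND PROOFS =====

-- blocks of `ls` when the current (nonempty) block so far is `cur`
def pvBW (cur : List String) : List String → List (List String)
  | [] => [cur]
  | l :: ls => if pvIsMarker l then cur :: pvBW [l] ls else pvBW (cur ++ [l]) ls

lemma pvStepA_marker (t c : List String) (l : String) (hm : pvIsMarker l = true) (hc : c ≠ []) :
    pvStepA (t, c) l = (t ++ [PySem.Str.strip (PySem.Str.join "\n" c)], [l]) := by
  have hc' : c.isEmpty = false := by simpa [List.isEmpty_iff] using hc
  simp only [pvIsMarker] at hm
  simp only [pvStepA, hc', Bool.not_false, Bool.and_true]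
  rw [if_pos hm]

lemma pvStepA_nomarker (t c : List String) (l : String) (hm : pvIsMarker l = false) :
    pvStepA (t, c) l = (t, c ++ [l]) := by
  simp only [pvIsMarker] at hm
  simp only [pvStepA]
  rw [hm, Bool.false_and, if_neg Bool.false_ne_true]

lemma pvStepA_start (l : String) : pvStepA ([], []) l = ([], [l]) := by
  simp only [pvStepA, List.isEmpty_nil, Bool.not_true, Bool.and_false]
  rw [if_neg Bool.false_ne_true]
  simp only [List.nil_append]

-- A's fold (with the final flush) produces exactly the joined blocks of pvBW
lemma pvFoldA_eq_pvBW : ∀ (ls t c : List String), c ≠ [] →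
    (if (ls.foldl pvStepA (t, c)).2.isEmpty then (ls.foldl pvStepA (t, c)).1
     else (ls.foldl pvStepA (t, c)).1 ++
       [PySem.Str.strip (PySem.Str.join "\n" (ls.foldl pvStepA (t, c)).2)])
    = t ++ (pvBW c ls).map (fun g => PySem.Str.strip (PySem.Str.join "\n" g)) := by
  intro ls
  induction ls with
  | nil =>
    intro t c hc
    have hc' : c.isEmpty = false := by simpa [List.isEmpty_iff] using hc
    simp only [List.foldl_nil, hc', pvBW, List.map_cons, List.map_nil]
    rw [if_neg Bool.false_ne_true]
  | cons l ls ih =>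
    intro t c hc
    rw [List.foldl_cons]
    by_cases hm : pvIsMarker l = true
    · rw [pvStepA_marker t c l hm hc,
         ih (t ++ [PySem.Str.strip (PySem.Str.join "\n" c)]) [l] (by simp)]
      rw [show pvBW c (l :: ls) = c :: pvBW [l] ls from by simp [pvBW, hm]]
      simp only [List.map_cons, List.append_assoc, List.singleton_append]
    · have hm' : pvIsMarker l = false := by revert hm; cases pvIsMarker l <;> simp
      rw [pvStepA_nomarker t c l hm', ih t (c ++ [l]) (by simp)]
      rw [show pvBW c (l :: ls) = pvBW (c ++ [l]) ls from by simp [pvBW, hm']]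

lemma pvBlocksB_nil : pvBlocksB [] = [] := by simp [pvBlocksB]

lemma pvBlocksB_cons (h : String) (t : List String) :
    pvBlocksB (h :: t) = (h :: (pvTakeRest t).1) :: pvBlocksB (pvTakeRest t).2 := by
  rw [pvBlocksB]

-- pvBW agrees with B's span-style grouping
lemma pvBW_eq_blocksB : ∀ (ls cur : List String),
    pvBW cur ls = (cur ++ (pvTakeRest ls).1) :: pvBlocksB (pvTakeRest ls).2 := by
  intro ls
  induction ls with
  | nil => intro cur; simp [pvBW, pvTakeRest, pvBlocksB_nil]
  | cons l ls ih =>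
    intro cur
    by_cases hm : pvIsMarker l = true
    · have ht : pvTakeRest (l :: ls) = ([], l :: ls) := by simp [pvTakeRest, hm]
      rw [ht, show pvBW cur (l :: ls) = cur :: pvBW [l] ls from by simp [pvBW, hm],
         ih [l], pvBlocksB_cons]
      simp
    · have hm' : pvIsMarker l = false := by revert hm; cases pvIsMarker l <;> simp
      have ht : pvTakeRest (l :: ls) = (l :: (pvTakeRest ls).1, (pvTakeRest ls).2) := by
        simp [pvTakeRest, hm']
      rw [ht, show pvBW cur (l :: ls) = pvBW (cur ++ [l]) ls from by simp [pvBW, hm'],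
         ih (cur ++ [l])]
      simp

-- ===== VERDICT (by name: the statement is the Claim_ definition above) =====
set_option maxHeartbeats 1000000 in
theorem split_topics_py_spec : Claim_equal_split_topics_py := by
  intro section_lines _
  unfold Spec_split_topics_py
  cases section_lines with
  | nil =>
    have hB : split_topics_py_alt [] = ["該当なし"] := by
      unfold split_topics_py_alt
      rw [pvBlocksB_nil]
      rfl
    rw [hB]
    rfl
  | cons h t =>
    simp only [split_topics_py, split_topics_py_alt, List.foldl_cons]
    rw [pvStepA_start]
    rw [pvFoldA_eq_pvBW t [] [h] (by simp)]
    rw [pvBW_eq_blocksB, pvBlocksB_cons]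
    simp only [List.nil_append, List.singleton_append]
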